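-- pv_equiv track=rewrite | github.com/peterdinh4444/HACKUSF2026 | UIBuilder/app.py | _filter_profiles_by_house_name
-- ===== SOURCE A (Python) =====
-- def _filter_profiles_by_house_name(profiles: list[dict], house_name: str) -> list[dict]:
--     hn = (house_name or "").strip().lower()
--     if not hn:
--         return profiles
--     exact = [p for p in profiles if (p.get("nickname") or "").strip().lower() == hn]
--     if exact:
--         return exact
--     return [
--         p
--         for p in profiles
--         if hn in (p.get("nickname") or "").lower() or hn in (p.get("address_line") or "").lower()
--     ]
-- ===== SOURCE B (Python) =====
-- def _filter_profiles_by_house_name(profiles: list[dict], house_name: str) -> list[dict]: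
--     hn = (house_name or "").strip().lower()
--     if not hn:
--         return profiles
--     # One substring scan only: collect partial matches, tagging each with exactness.
--     # Correct because every exact match is a partial match (stripping removes only
--     # edge whitespace, so an exactly-matching nickname contains hn as a substring).
--     tagged = []
--     for p in profiles:
--         nick = p.get("nickname") or ""
--         if hn in nick.lower() or hn in (p.get("address_line") or "").lower():
--             tagged.append((p, nick.strip().lower() == hn))
--     if any(e for _, e in tagged):
--         return [p for p, e in tagged if e]
--     return [p for p, _ in tagged]
-- ===== Notes on version B (the rewrite author's own statement) =====
-- stated objective: alternative
-- what changed: Instead of A's exact-filter pass plus a second full substring pass, B does a single substring scan that builds only the partial-match list tagged with exactness, then post-filters the tagged partials for exact matches; correctness rests on the proved lemma that every exact match is a partial match.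
import Mathlib
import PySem

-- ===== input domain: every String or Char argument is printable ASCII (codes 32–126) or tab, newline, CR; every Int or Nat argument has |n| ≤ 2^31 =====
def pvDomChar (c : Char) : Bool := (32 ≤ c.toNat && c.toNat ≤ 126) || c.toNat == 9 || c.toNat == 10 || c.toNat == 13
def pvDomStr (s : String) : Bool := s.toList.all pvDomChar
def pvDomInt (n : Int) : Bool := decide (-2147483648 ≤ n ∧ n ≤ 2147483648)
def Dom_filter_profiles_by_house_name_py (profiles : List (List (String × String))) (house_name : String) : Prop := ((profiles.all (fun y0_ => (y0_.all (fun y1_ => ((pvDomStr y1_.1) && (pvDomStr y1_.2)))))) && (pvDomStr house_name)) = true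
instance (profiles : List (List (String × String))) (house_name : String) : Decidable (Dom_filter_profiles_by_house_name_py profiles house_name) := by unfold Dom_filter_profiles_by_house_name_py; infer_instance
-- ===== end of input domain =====

-- B replaces A's exact-filter pass + second full substring pass with a single substring scan building a tagged partial list, post-filtered for exact matches (exact ⊆ partial is proved as a lemma); same return value.


-- ===== PORT A =====
-- p.get(k) or "" : first-match lookup in the association list; "" when missing (None or "" = "", and "" or "" = "")
def pvGetS (p : List (String × String)) (k : String) : String :=
  (((p.find? (fun kv => kv.1 == k)).map (fun kv => kv.2)).getD "")

def filter_profiles_by_house_name_py (profiles : List (List (String × String))) (house_name : String) : List (List (String × String)) :=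
  let hn := PySem.Str.lower (PySem.Str.strip house_name)
  if hn = "" then profiles
  else
    let exact := profiles.filter (fun p => PySem.Str.lower (PySem.Str.strip (pvGetS p "nickname")) == hn)
    if exact ≠ [] then exact
    else profiles.filter (fun p =>
      PySem.Str.isIn hn (PySem.Str.lower (pvGetS p "nickname")) ||
      PySem.Str.isIn hn (PySem.Str.lower (pvGetS p "address_line")))

-- ===== PORT B =====
-- single scan: collect partial matches tagged with exactness, then post-filter the tags
def filter_profiles_by_house_name_py_alt (profiles : List (List (String × String))) (house_name : String) : List (List (String × String)) :=
  let hn := PySem.Str.lower (PySem.Str.strip house_name)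
  if hn = "" then profiles
  else
    let tagged := profiles.foldl
      (fun (acc : List (List (String × String) × Bool)) p =>
        let nick := pvGetS p "nickname"
        if PySem.Str.isIn hn (PySem.Str.lower nick) ||
           PySem.Str.isIn hn (PySem.Str.lower (pvGetS p "address_line"))
        then acc ++ [(p, PySem.Str.lower (PySem.Str.strip nick) == hn)]
        else acc) []
    if tagged.any (fun pe => pe.2) then (tagged.filter (fun pe => pe.2)).map (fun pe => pe.1)
    else tagged.map (fun pe => pe.1)

-- ===== PRECONDITION & SPEC =====
def Spec_filter_profiles_by_house_name_py (profiles : List (List (String × String))) (house_name : String) (out : List (List (String × String))) : Prop := out = filter_profiles_by_house_name_py_alt profiles house_name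
instance (profiles : List (List (String × String))) (house_name : String) (out : List (List (String × String))) : Decidable (Spec_filter_profiles_by_house_name_py profiles house_name out) := by unfold Spec_filter_profiles_by_house_name_py; infer_instance

-- ===== CLAIM =====
def Claim_equal_filter_profiles_by_house_name_py : Prop := ∀ (profiles : List (List (String × String))) (house_name : String), Dom_filter_profiles_by_house_name_py profiles house_name → Spec_filter_profiles_by_house_name_py profiles house_name (filter_profiles_by_house_name_py profiles house_name)

-- ===== LEMMAS AND PROOFS =====

-- Stripping only removes characters at the ends: strip s is an infix of s.
theorem pv_strip_infix (s : List Char) : PySem.Chars.strip s <:+: s := by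
  unfold PySem.Chars.strip PySem.Chars.rstrip PySem.Chars.lstrip
  have h1 : List.dropWhile PySem.Chars.isspace s <:+ s := List.dropWhile_suffix _
  have h2 : (List.dropWhile PySem.Chars.isspace (List.dropWhile PySem.Chars.isspace s).reverse).reverse
      <+: (List.dropWhile PySem.Chars.isspace s).reverse.reverse :=
    List.reverse_prefix.mpr (List.dropWhile_suffix _)
  rw [List.reverse_reverse] at h2
  exact h2.isInfix.trans h1.isInfix

-- every exact match is a partial match: if lower(strip nick) = hn then hn occurs in lower nick
theorem pv_exact_imp_partial (hn nick : String)
    (h : PySem.Str.lower (PySem.Str.strip nick) = hn) :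
    PySem.Str.isIn hn (PySem.Str.lower nick) = true := by
  rw [PySem.Str.isIn_iff_infix, ← h]
  simp only [PySem.Str.toList_lower, PySem.Str.toList_strip]
  show PySem.Chars.lower _ <:+: PySem.Chars.lower _
  unfold PySem.Chars.lower
  exact (pv_strip_infix nick.toList).map _

-- ===== VERDICT =====
theorem filter_profiles_by_house_name_py_spec : Claim_equal_filter_profiles_by_house_name_py := by
  intro profiles house_name _
  unfold Spec_filter_profiles_by_house_name_py
  unfold filter_profiles_by_house_name_py filter_profiles_by_house_name_py_alt
  simp only []
  set hn := PySem.Str.lower (PySem.Str.strip house_name) with hhn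
  by_cases h : hn = ""
  · simp [h]
  · simp only [h, if_false]
    set P : List (String × String) → Bool := fun p =>
      PySem.Str.isIn hn (PySem.Str.lower (pvGetS p "nickname")) ||
      PySem.Str.isIn hn (PySem.Str.lower (pvGetS p "address_line")) with hP
    set E : List (String × String) → Bool := fun p =>
      PySem.Str.lower (PySem.Str.strip (pvGetS p "nickname")) == hn with hE
    have himp : ∀ p, E p = true → P p = true := by
      intro p hEp
      simp only [hE, beq_iff_eq] at hEp
      simp only [hP, Bool.or_eq_true]
      exact Or.inl (pv_exact_imp_partial hn _ hEp)
    have htag : profiles.foldl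
        (fun (acc : List (List (String × String) × Bool)) p =>
          if P p then acc ++ [(p, E p)] else acc) []
        = [] ++ (profiles.filter P).map (fun p => (p, E p)) :=
      PySem.List.foldl_append_if P (fun p => (p, E p)) profiles []
    simp only [List.nil_append] at htag
    rw [htag]
    have hany : ((profiles.filter P).map (fun p => (p, E p))).any (fun pe => pe.2)
        = profiles.any E := by
      rw [List.any_map, List.any_filter]
      refine List.any_congr rfl fun p => ?_
      show (P p && E p) = E p
      by_cases hEp : E p = true
      · simp [hEp, himp p hEp]
      · simp [Bool.eq_false_iff.mpr hEp]
    rw [hany]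
    by_cases hex : profiles.filter E = []
    · have hanyf : profiles.any E = false := by
        simp only [List.any_eq_false]
        intro p hp
        exact Bool.eq_false_iff.mp (Bool.eq_false_iff.mpr fun hEp =>
          (List.filter_eq_nil_iff.mp hex p hp) hEp)
      rw [hanyf]
      simp only [hex, ne_eq, not_true_eq_false, if_false, Bool.false_eq_true]
      rw [List.map_map]
      exact (List.map_id _).symm
    · have hanyt : profiles.any E = true := by
        rcases List.exists_mem_of_ne_nil _ hex with ⟨p, hp⟩
        rw [List.mem_filter] at hp
        exact List.any_eq_true.mpr ⟨p, hp.1, hp.2⟩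
      rw [hanyt, if_pos hex, if_pos rfl]
      rw [List.filter_map, List.map_map]
      have hff : (profiles.filter P).filter
          (((fun pe => pe.2) : _ × Bool → Bool) ∘ fun p => (p, E p)) = profiles.filter E := by
        rw [show (((fun pe => pe.2) : _ × Bool → Bool) ∘ fun p => (p, E p)) = E from rfl,
          List.filter_filter]
        apply List.filter_congr
        intro p _
        by_cases hEp : E p = true
        · simp [hEp, himp p hEp]
        · simp [Bool.eq_false_iff.mpr hEp]
      rw [hff]
      exact (List.map_id _).symm
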